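-- pv_equiv track=rewrite | github.com/belovmd/it-academy-spring-2021 | src/homework2/codewars_task/merged_string_checker_5kuy.py | compare_sequence_of_chars_simple
-- ===== SOURCE A (Python) =====
-- def compare_sequence_of_chars_simple(s, part1, part2):
--     for chr_ in s:
--         if part1 and chr_ == part1[0]:
--             part1 = part1[1:]
--             continue
--         if part2 and chr_ == part2[0]:
--             part2 = part2[1:]
--             continue
--         return False
--     return True
-- ===== SOURCE B (Python) =====
-- def compare_sequence_of_chars_simple(s, part1, part2):
--     i = j = 0
--     n1, n2 = len(part1), len(part2)
--     for ch in s: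
--         if i < n1 and ch == part1[i]:
--             i += 1
--         elif j < n2 and ch == part2[j]:
--             j += 1
--         else:
--             return False
--     return True
-- ===== Notes on version B (the rewrite author's own statement) =====
-- stated objective: faster
-- what changed: B tracks integer index pointers into part1/part2 instead of rebuilding part1[1:]/part2[1:] string slices at every consumed character, removing the O(n) copy inside the loop.
import Mathlib
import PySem

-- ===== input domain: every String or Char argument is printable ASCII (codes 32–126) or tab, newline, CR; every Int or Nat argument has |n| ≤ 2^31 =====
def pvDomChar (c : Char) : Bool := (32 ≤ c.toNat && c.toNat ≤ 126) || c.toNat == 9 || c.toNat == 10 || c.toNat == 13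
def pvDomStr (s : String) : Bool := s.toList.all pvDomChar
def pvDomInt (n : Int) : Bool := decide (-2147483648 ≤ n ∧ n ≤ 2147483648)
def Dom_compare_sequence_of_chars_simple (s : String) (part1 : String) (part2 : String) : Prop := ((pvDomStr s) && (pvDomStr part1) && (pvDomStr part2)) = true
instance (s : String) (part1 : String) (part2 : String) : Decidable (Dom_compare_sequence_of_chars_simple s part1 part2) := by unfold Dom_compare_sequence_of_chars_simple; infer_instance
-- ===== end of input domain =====

-- ===== PORT A =====
-- B replaces A's per-character string slicing by two integer index pointers (same greedy rule); objective: faster.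

-- Literal port of A's loop: walks s, shrinking part1/part2 by slicing ([1:]) on a match.
def pvGoA : List Char → List Char → List Char → Bool
  | [], _, _ => true
  | c :: s, p1, p2 =>
    match p1 with
    | a :: p1' =>
      if c = a then pvGoA s p1' p2
      else
        match p2 with
        | b :: p2' => if c = b then pvGoA s (a :: p1') p2' else false
        | [] => false
    | [] =>
      match p2 with
      | b :: p2' => if c = b then pvGoA s [] p2' else false
      | [] => false

def compare_sequence_of_chars_simple (s : String) (part1 : String) (part2 : String) : Bool :=
  pvGoA s.toList part1.toList part2.toList

-- ===== PORT B =====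
-- Literal port of B's loop: two index pointers i, j into fixed part1/part2.
def pvGoB (p1 p2 : List Char) : List Char → Nat → Nat → Bool
  | [], _, _ => true
  | c :: s, i, j =>
    if i < p1.length ∧ c = p1.getD i ' ' then pvGoB p1 p2 s (i + 1) j
    else if j < p2.length ∧ c = p2.getD j ' ' then pvGoB p1 p2 s i (j + 1)
    else false

def compare_sequence_of_chars_simple_alt (s : String) (part1 : String) (part2 : String) : Bool :=
  pvGoB part1.toList part2.toList s.toList 0 0

-- ===== PRECONDITION & SPEC =====
def Spec_compare_sequence_of_chars_simple (s : String) (part1 : String) (part2 : String) (out : Bool) : Prop := out = compare_sequence_of_chars_simple_alt s part1 part2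
instance (s : String) (part1 : String) (part2 : String) (out : Bool) : Decidable (Spec_compare_sequence_of_chars_simple s part1 part2 out) := by unfold Spec_compare_sequence_of_chars_simple; infer_instance

-- ===== CLAIM =====
def Claim_equal_compare_sequence_of_chars_simple : Prop := ∀ (s : String) (part1 : String) (part2 : String), Dom_compare_sequence_of_chars_simple s part1 part2 → Spec_compare_sequence_of_chars_simple s part1 part2 (compare_sequence_of_chars_simple s part1 part2)

-- ===== LEMMAS AND PROOFS =====
theorem pvGo_eq (P1 P2 : List Char) :
    ∀ (s : List Char) (i j : Nat), pvGoA s (P1.drop i) (P2.drop j) = pvGoB P1 P2 s i j := by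
  intro s
  induction s with
  | nil => intro i j; simp [pvGoA, pvGoB]
  | cons c s ih =>
    intro i j
    by_cases h1 : i < P1.length
    · rw [List.drop_eq_getElem_cons h1]
      by_cases hc1 : c = P1[i]
      · have : P1.getD i ' ' = P1[i] := List.getD_eq_getElem P1 ' ' h1
        simp [pvGoA, pvGoB, hc1, h1, ih]
      · by_cases h2 : j < P2.length
        · rw [List.drop_eq_getElem_cons h2]
          have e1 : P1.getD i ' ' = P1[i] := List.getD_eq_getElem P1 ' ' h1
          have e2 : P2.getD j ' ' = P2[j] := List.getD_eq_getElem P2 ' ' h2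
          by_cases hc2 : c = P2[j]
          · have hne : P2[j] ≠ P1[i] := by rw [← hc2]; exact hc1
            simp [pvGoA, pvGoB, hc2, h1, h2, hne, ih i (j + 1)]
          · simp [pvGoA, pvGoB, hc1, hc2, h1, h2]
        · have : P2.drop j = [] := List.drop_eq_nil_of_le (by omega)
          simp [pvGoA, pvGoB, hc1, h1, h2, this]
    · have e1 : P1.drop i = [] := List.drop_eq_nil_of_le (by omega)
      by_cases h2 : j < P2.length
      · rw [List.drop_eq_getElem_cons h2]
        have e2 : P2.getD j ' ' = P2[j] := List.getD_eq_getElem P2 ' ' h2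
        by_cases hc2 : c = P2[j]
        · have := ih i (j + 1)
          rw [e1] at this
          simp [pvGoA, pvGoB, e1, hc2, h1, h2, this]
        · simp [pvGoA, pvGoB, e1, hc2, h1, h2]
      · have e2 : P2.drop j = [] := List.drop_eq_nil_of_le (by omega)
        simp [pvGoA, pvGoB, e1, e2, h1, h2]

-- ===== VERDICT =====
theorem compare_sequence_of_chars_simple_spec : Claim_equal_compare_sequence_of_chars_simple := by
  intro s part1 part2 _
  unfold Spec_compare_sequence_of_chars_simple
  unfold compare_sequence_of_chars_simple compare_sequence_of_chars_simple_alt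
  simpa using pvGo_eq part1.toList part2.toList s.toList 0 0
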